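-- pv_equiv track=rewrite | github.com/Seraphinianus/AI-LABS-DIMA | LAB 2/tabu-knapsack-evol.py | generate_neighbours_of_solution
-- ===== SOURCE A (Python) =====
-- def generate_neighbours_of_solution(solution, data, max):
--     neighbours = []
--     for i in range(len(solution)):
--         neighbour = solution.copy()
--         bit = neighbour[i]
--         neighbour[i] = 0 if bit else 1
--         if is_valid(total_weight(neighbour, data), max):
--             neighbours.append(neighbour)
--
--     return neighbours
--
-- def is_valid(weight, max):
--     if weight <= max:
--         return True
--     else:
--         return False
--
-- def total_weight(solution, data):
--     sum = 0
--     for item in data: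
--         if solution[item[0] - 1]:
--             sum = sum + item[1]
--
--     return sum
-- ===== SOURCE B (Python) =====
-- def generate_neighbours_of_solution(solution, data, max):
--     # Precompute per-position weights and the current total once, then each
--     # single-bit flip's weight is an O(1) incremental update.
--     n = len(solution)
--     if n == 0:
--         return []
--     w = [0] * n
--     for item in data:
--         w[item[0] - 1] += item[1]
--     base = 0
--     for i in range(n):
--         if solution[i]:
--             base += w[i]
--     neighbours = []
--     for i in range(n):
--         bit = solution[i]
--         new_weight = base - w[i] if bit else base + w[i]
--         if new_weight <= max:
--             neighbour = solution.copy()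
--             neighbour[i] = 0 if bit else 1
--             neighbours.append(neighbour)
--     return neighbours
-- ===== Notes on version B (the rewrite author's own statement) =====
-- stated objective: faster
-- what changed: B precomputes per-position weights and the current total weight once, then evaluates each single-bit flip by an O(1) incremental update instead of rescanning all of data for every flipped copy.
import Mathlib
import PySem

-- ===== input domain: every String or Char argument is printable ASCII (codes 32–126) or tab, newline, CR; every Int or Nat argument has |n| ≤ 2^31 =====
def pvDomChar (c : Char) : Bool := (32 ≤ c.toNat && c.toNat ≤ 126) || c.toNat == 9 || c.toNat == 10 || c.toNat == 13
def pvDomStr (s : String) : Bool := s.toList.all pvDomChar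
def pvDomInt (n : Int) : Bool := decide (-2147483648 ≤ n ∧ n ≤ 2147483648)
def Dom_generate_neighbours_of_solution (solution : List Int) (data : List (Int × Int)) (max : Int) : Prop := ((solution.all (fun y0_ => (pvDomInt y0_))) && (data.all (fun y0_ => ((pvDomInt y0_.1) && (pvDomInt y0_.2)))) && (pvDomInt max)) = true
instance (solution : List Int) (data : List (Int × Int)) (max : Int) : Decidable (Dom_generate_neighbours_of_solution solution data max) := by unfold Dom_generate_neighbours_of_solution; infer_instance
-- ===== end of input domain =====

-- B precomputes per-position weights and the running total once and updates each
-- single-bit flip incrementally in O(1), instead of A's full rescan of data per flip.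

-- ===== PORT A =====
def pv_is_valid (weight mx : Int) : Bool :=
  if weight ≤ mx then true else false

def pv_total_weight (solution : List Int) (data : List (Int × Int)) : Int :=
  data.foldl (fun s item =>
    if PySem.List.pyGetD solution (item.1 - 1) 0 ≠ 0 then s + item.2 else s) 0

def generate_neighbours_of_solution (solution : List Int) (data : List (Int × Int)) (max : Int) : List (List Int) :=
  (List.range solution.length).foldl (fun neighbours i =>
    let bit := solution.getD i 0
    let neighbour := solution.set i (if bit ≠ 0 then 0 else 1)
    if pv_is_valid (pv_total_weight neighbour data) max then neighbours ++ [neighbour]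
    else neighbours) []

-- ===== PORT B =====
def pv_weights (n : Nat) (data : List (Int × Int)) : List Int :=
  data.foldl (fun w item =>
    PySem.List.pySetD w (item.1 - 1) (PySem.List.pyGetD w (item.1 - 1) 0 + item.2))
    (List.replicate n 0)

def pv_base (solution w : List Int) : Int :=
  (List.range solution.length).foldl
    (fun s i => if solution.getD i 0 ≠ 0 then s + w.getD i 0 else s) 0

def generate_neighbours_of_solution_alt (solution : List Int) (data : List (Int × Int)) (max : Int) : List (List Int) :=
  if solution.length = 0 then [] else
  let w := pv_weights solution.length data
  let base := pv_base solution w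
  (List.range solution.length).foldl (fun neighbours i =>
    let bit := solution.getD i 0
    let nw := if bit ≠ 0 then base - w.getD i 0 else base + w.getD i 0
    if nw ≤ max then neighbours ++ [solution.set i (if bit ≠ 0 then 0 else 1)]
    else neighbours) []

-- ===== PRECONDITION & SPEC =====
-- Pre_ excludes exactly the inputs where A raises IndexError: some data item whose
-- (id - 1) is not a valid Python index into solution, while solution is non-empty
-- (for empty solution A's loop never runs and it returns []).
def Pre_generate_neighbours_of_solution (solution : List Int) (data : List (Int × Int)) (max : Int) : Prop :=
  solution = [] ∨ ∀ item ∈ data, PySem.Raise.InRange solution.length (item.1 - 1)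
instance (solution : List Int) (data : List (Int × Int)) (max : Int) : Decidable (Pre_generate_neighbours_of_solution solution data max) := by unfold Pre_generate_neighbours_of_solution; infer_instance

def pvWitness_generate_neighbours_of_solution : List Int × (List (Int × Int)) × Int :=
  ([1, 0, 1], [(1, 3), (2, 4), (3, 2)], 6)

def Spec_generate_neighbours_of_solution (solution : List Int) (data : List (Int × Int)) (max : Int) (out : List (List Int)) : Prop := out = generate_neighbours_of_solution_alt solution data max
instance (solution : List Int) (data : List (Int × Int)) (max : Int) (out : List (List Int)) : Decidable (Spec_generate_neighbours_of_solution solution data max out) := by unfold Spec_generate_neighbours_of_solution; infer_instance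

-- ===== CLAIM (what is proved, stated in full; the proofs are below) =====
def Claim_equal_generate_neighbours_of_solution : Prop := ∀ (solution : List Int) (data : List (Int × Int)) (max : Int), Dom_generate_neighbours_of_solution solution data max → Pre_generate_neighbours_of_solution solution data max → Spec_generate_neighbours_of_solution solution data max (generate_neighbours_of_solution solution data max)

-- ===== LEMMAS AND PROOFS =====

-- resolved (non-negative) index of Python index i in a list of length n
def pvResolve (n : Nat) (i : Int) : Nat := (if i < 0 then i + n else i).toNat

theorem pvResolve_lt {n : Nat} {i : Int} (h : PySem.Raise.InRange n i) :
    pvResolve n i < n := by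
  simp [PySem.Raise.InRange] at h
  unfold pvResolve
  split <;> omega

theorem pyGetD_resolve {xs : List Int} {i : Int} (d : Int)
    (h : PySem.Raise.InRange xs.length i) :
    PySem.List.pyGetD xs i d = xs.getD (pvResolve xs.length i) d := by
  simp [PySem.Raise.InRange] at h
  unfold pvResolve
  by_cases hneg : i < 0
  · have hk : i = -(((-i).toNat : Nat) : Int) := by omega
    rw [hk, PySem.List.pyGetD_neg_natCast _ _ _ (by omega) (by omega)]
    have h1 : (if -(((-i).toNat : Nat) : Int) < 0 then -(((-i).toNat : Nat) : Int) + xs.length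
        else -(((-i).toNat : Nat) : Int)).toNat = xs.length - (-i).toNat := by
      split <;> omega
    rw [h1, List.getD_eq_getElem _ _ (by omega)]
  · rw [PySem.List.pyGetD_eq_getElem _ _ (by omega) (by omega)]
    simp only [if_neg hneg]
    rw [List.getD_eq_getElem _ _ (by omega)]

theorem pySetD_resolve {xs : List Int} {i : Int} (v : Int)
    (h : PySem.Raise.InRange xs.length i) :
    PySem.List.pySetD xs i v = xs.set (pvResolve xs.length i) v := by
  simp [PySem.Raise.InRange] at h
  unfold pvResolve
  by_cases hneg : i < 0
  · simp only [PySem.List.pySetD, PySem.List.pySet?, PySem.List.pyIdx?,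
      if_neg (show ¬ 0 ≤ i by omega), if_pos (show -(xs.length : Int) ≤ i by omega)]
    simp only [Option.map_some, Option.getD_some]
    congr 1
    split <;> omega
  · rw [PySem.List.pySetD_of_nonneg _ _ (by omega)]
    simp only [if_neg hneg]

-- fold over range as a Finset sum
theorem foldl_range_sum (f : Nat → Int) (n : Nat) (s0 : Int) :
    (List.range n).foldl (fun s i => s + f i) s0 = s0 + ∑ j ∈ Finset.range n, f j := by
  induction n generalizing s0 with
  | zero => simp
  | succ m ih =>
    rw [List.range_succ, List.foldl_append, ih, Finset.sum_range_succ]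
    simp [add_assoc]

theorem pv_base_eq_sum (sol w : List Int) :
    pv_base sol w = ∑ j ∈ Finset.range sol.length,
      (if sol.getD j 0 ≠ 0 then w.getD j 0 else 0) := by
  unfold pv_base
  have hfun : (fun (s : Int) (i : Nat) => if sol.getD i 0 ≠ 0 then s + w.getD i 0 else s)
      = fun s i => s + (if sol.getD i 0 ≠ 0 then w.getD i 0 else 0) := by
    funext s i; split_ifs <;> simp
  rw [hfun, foldl_range_sum]
  simp

-- accumulator shift for A's weight fold
theorem tw_shift (sol : List Int) (data : List (Int × Int)) (s0 : Int) :
    data.foldl (fun s item =>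
      if PySem.List.pyGetD sol (item.1 - 1) 0 ≠ 0 then s + item.2 else s) s0
    = s0 + pv_total_weight sol data := by
  unfold pv_total_weight
  induction data generalizing s0 with
  | nil => simp
  | cons item rest ih =>
    simp only [List.foldl_cons]
    rw [ih ((if PySem.List.pyGetD sol (item.1 - 1) 0 ≠ 0 then s0 + item.2 else s0)),
        ih ((if PySem.List.pyGetD sol (item.1 - 1) 0 ≠ 0 then (0:Int) + item.2 else 0))]
    split_ifs <;> ring

-- updating w at one in-range position shifts pv_base by the guarded delta
theorem pv_base_set_w (sol w : List Int) (r : Nat) (x : Int)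
    (hr : r < w.length) (hrs : r < sol.length) :
    pv_base sol (w.set r x)
      = pv_base sol w
        + (if sol.getD r 0 ≠ 0 then x - w.getD r 0 else 0) := by
  rw [pv_base_eq_sum, pv_base_eq_sum]
  rw [← Finset.add_sum_erase (Finset.range sol.length) _ (Finset.mem_range.mpr hrs),
      ← Finset.add_sum_erase (Finset.range sol.length)
        (fun j => if sol.getD j 0 ≠ 0 then w.getD j 0 else 0) (Finset.mem_range.mpr hrs)]
  have herase : ∑ j ∈ (Finset.range sol.length).erase r,
        (if sol.getD j 0 ≠ 0 then (w.set r x).getD j 0 else 0)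
      = ∑ j ∈ (Finset.range sol.length).erase r,
        (if sol.getD j 0 ≠ 0 then w.getD j 0 else 0) := by
    refine Finset.sum_congr rfl (fun j hj => ?_)
    have hjr : j ≠ r := (Finset.mem_erase.mp hj).1
    simp only [List.getD_eq_getElem?_getD]
    rw [List.getElem?_set_ne (Ne.symm hjr)]
  rw [herase]
  have hat : (w.set r x).getD r 0 = x := by
    rw [List.getD_eq_getElem?_getD, List.getElem?_set_self (by simpa using hr)]
    simp
  rw [hat]
  split_ifs <;> ring

-- the core exchange: A's rescan equals B's base formula, for any list of the right length
theorem tw_eq_base (data : List (Int × Int)) (n : Nat) (sol : List Int)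
    (hsol : sol.length = n)
    (hidx : ∀ item ∈ data, PySem.Raise.InRange n (item.1 - 1)) :
    pv_total_weight sol data = pv_base sol (pv_weights n data) := by
  unfold pv_weights
  suffices h : ∀ w0 : List Int, w0.length = n →
      pv_base sol (data.foldl (fun w item =>
        PySem.List.pySetD w (item.1 - 1) (PySem.List.pyGetD w (item.1 - 1) 0 + item.2)) w0)
      = pv_base sol w0 + pv_total_weight sol data by
    rw [h (List.replicate n 0) (by simp)]
    have hz : pv_base sol (List.replicate n (0:Int)) = 0 := by
      rw [pv_base_eq_sum]
      refine Finset.sum_eq_zero (fun j _ => ?_)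
      have hrep : (List.replicate n (0:Int)).getD j 0 = 0 := by
        rw [List.getD_eq_getElem?_getD]
        by_cases hj2 : j < n
        · simp [hj2]
        · rw [List.getElem?_eq_none (by simpa using hj2)]
          rfl
      simp
    rw [hz, zero_add]
  induction data with
  | nil => intro w0 _; simp [pv_total_weight]
  | cons item rest ih =>
    intro w0 hw0
    have hitem := hidx item (by simp)
    have hrest : ∀ it ∈ rest, PySem.Raise.InRange n (it.1 - 1) :=
      fun it hit => hidx it (by simp [hit])
    simp only [List.foldl_cons]
    rw [ih hrest _ (by rw [PySem.List.length_pySetD]; exact hw0)]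
    have hr : pvResolve n (item.1 - 1) < n := pvResolve_lt hitem
    have hset : PySem.List.pySetD w0 (item.1 - 1)
          (PySem.List.pyGetD w0 (item.1 - 1) 0 + item.2)
        = w0.set (pvResolve n (item.1 - 1))
          (w0.getD (pvResolve n (item.1 - 1)) 0 + item.2) := by
      rw [pySetD_resolve _ (by rw [hw0]; exact hitem),
          pyGetD_resolve _ (by rw [hw0]; exact hitem), hw0]
    rw [hset, pv_base_set_w sol w0 _ _ (by omega) (by omega)]
    have hget : PySem.List.pyGetD sol (item.1 - 1) 0
        = sol.getD (pvResolve n (item.1 - 1)) 0 := by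
      rw [pyGetD_resolve _ (by rw [hsol]; exact hitem), hsol]
    conv_rhs => unfold pv_total_weight
    simp only [List.foldl_cons]
    rw [tw_shift, hget]
    split_ifs <;> ring

-- flipping one bit changes pv_base by ± the weight at that position
theorem pv_base_flip (sol w : List Int) (i : Nat) (hi : i < sol.length) :
    pv_base (sol.set i (if sol.getD i 0 ≠ 0 then 0 else 1)) w
      = if sol.getD i 0 ≠ 0 then pv_base sol w - w.getD i 0
        else pv_base sol w + w.getD i 0 := by
  rw [pv_base_eq_sum, pv_base_eq_sum, List.length_set]
  rw [← Finset.add_sum_erase (Finset.range sol.length) _ (Finset.mem_range.mpr hi)]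
  have herase : ∑ j ∈ (Finset.range sol.length).erase i,
        (if (sol.set i (if sol.getD i 0 ≠ 0 then 0 else 1)).getD j 0 ≠ 0 then w.getD j 0 else 0)
      = ∑ j ∈ (Finset.range sol.length).erase i,
        (if sol.getD j 0 ≠ 0 then w.getD j 0 else 0) := by
    refine Finset.sum_congr rfl (fun j hj => ?_)
    have hjr : j ≠ i := (Finset.mem_erase.mp hj).1
    simp only [List.getD_eq_getElem?_getD]
    rw [List.getElem?_set_ne (Ne.symm hjr)]
  rw [herase]
  have hat : (sol.set i (if sol.getD i 0 ≠ 0 then 0 else 1)).getD i 0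
      = (if sol.getD i 0 ≠ 0 then 0 else 1) := by
    rw [List.getD_eq_getElem?_getD, List.getElem?_set_self hi]
    simp
  rw [hat]
  rw [← Finset.add_sum_erase (Finset.range sol.length)
        (fun j => if sol.getD j 0 ≠ 0 then w.getD j 0 else 0) (Finset.mem_range.mpr hi)]
  split_ifs with h h2 h3 <;> simp_all <;> ring

-- folds over the same range with pointwise-equal steps agree
theorem foldl_range_congr {β : Type} (n : Nat) (f g : β → Nat → β) (a : β)
    (h : ∀ acc i, i < n → f acc i = g acc i) :
    (List.range n).foldl f a = (List.range n).foldl g a := by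
  induction n generalizing a with
  | zero => simp
  | succ m ih =>
    rw [List.range_succ, List.foldl_append, List.foldl_append]
    simp only [List.foldl_cons, List.foldl_nil]
    rw [ih _ (fun acc i hi => h acc i (by omega)), h _ m (by omega)]

-- ===== VERDICT (by name: the statement is the Claim_ definition above) =====
theorem generate_neighbours_of_solution_spec : Claim_equal_generate_neighbours_of_solution := by
  intro solution data max _ hpre
  unfold Spec_generate_neighbours_of_solution
  rcases hpre with hnil | hidx
  · subst hnil
    rfl
  · unfold generate_neighbours_of_solution generate_neighbours_of_solution_alt
    by_cases hn : solution.length = 0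
    · simp [hn]
    · rw [if_neg hn]
      refine foldl_range_congr _ _ _ _ (fun acc i hi => ?_)
      simp only []
      have hlen : (solution.set i (if solution.getD i 0 ≠ 0 then 0 else 1)).length
          = solution.length := by simp
      rw [tw_eq_base data solution.length _ hlen hidx, pv_base_flip _ _ _ hi]
      unfold pv_is_valid
      split_ifs <;> simp_all
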